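-- pv_equiv track=rewrite | github.com/ade-d/sonic-utilities | sfputil/main.py | raw_bytes_to_string_pretty
-- ===== SOURCE A (Python) =====
-- def raw_bytes_to_string_pretty(raw_bytes):
--     hexstr = ""
--
--     for i in range(0, len(raw_bytes)):
--         if i > 0 and (i % 8) == 0:
--             hexstr += " "
--
--         if i > 0 and (i % 16) == 0:
--             hexstr += "\n"
--
--         hexstr += raw_bytes[i]
--         hexstr += " "
--
--     return hexstr
-- ===== SOURCE B (Python) =====
-- def raw_bytes_to_string_pretty(raw_bytes):
--     out = ""
--     n = len(raw_bytes)
--     i = 0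
--     while i < n:
--         row = raw_bytes[i:i + 16]
--         s = ""
--         for b in row[:8]:
--             s += b + " "
--         if len(row) > 8:
--             s += " "
--             for b in row[8:]:
--                 s += b + " "
--         out += s if i == 0 else " \n" + s
--         i += 16
--     return out
-- ===== Notes on version B (the rewrite author's own statement) =====
-- stated objective: alternative
-- what changed: Replaces A's single index loop with per-index modulus tests by recursively chunking the input into rows of 16 (two halves of up to 8), emitting each row's spacing wholesale and joining rows with ' \n'.
import Mathlib
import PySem

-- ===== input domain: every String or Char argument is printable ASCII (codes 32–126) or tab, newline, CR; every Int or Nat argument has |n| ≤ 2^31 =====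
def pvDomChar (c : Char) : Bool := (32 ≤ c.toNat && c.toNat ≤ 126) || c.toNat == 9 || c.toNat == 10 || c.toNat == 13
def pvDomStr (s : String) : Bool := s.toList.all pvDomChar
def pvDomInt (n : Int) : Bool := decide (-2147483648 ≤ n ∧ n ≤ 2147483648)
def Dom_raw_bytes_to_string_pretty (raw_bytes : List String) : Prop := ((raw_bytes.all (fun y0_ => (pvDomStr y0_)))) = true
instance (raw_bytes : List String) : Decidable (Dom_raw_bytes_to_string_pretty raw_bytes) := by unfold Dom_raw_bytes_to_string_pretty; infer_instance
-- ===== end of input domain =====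

-- B replaces A's single index loop with modulus tests by chunking into rows of 16
-- (two halves of 8, with the extra spaces per row) emitted recursively; objective: simpler decomposition.

-- ===== PORT A =====
-- raw_bytes[i] is always in range (i ∈ range(len)), so pyGetD with default "" is exact here.
def raw_bytes_to_string_pretty (raw_bytes : List String) : String :=
  (PySem.List.pyRange 0 (raw_bytes.length : Int) 1).foldl
    (fun hexstr i =>
      let h1 := if 0 < i ∧ PySem.Int.mod i 8 = 0 then hexstr ++ " " else hexstr
      let h2 := if 0 < i ∧ PySem.Int.mod i 16 = 0 then h1 ++ "\n" else h1
      h2 ++ PySem.List.pyGetD raw_bytes i "" ++ " ") ""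

-- ===== PORT B =====
-- port of B's "for b in …: s += b + ' '" loop
def pvRowHalf (s : String) (l : List String) : String := l.foldl (fun s b => s ++ b ++ " ") s

-- port of B's while loop (state: out, i)
def pvLoopB (full : List String) (out : String) (i : Int) : String :=
  if _h : i < (full.length : Int) then
    let row := PySem.List.slice full (some i) (some (i + 16))
    let s := pvRowHalf "" (PySem.List.slice row none (some 8))
    let s := if 8 < row.length then pvRowHalf (s ++ " ") (PySem.List.slice row (some 8) none) else s
    pvLoopB full (out ++ if i = 0 then s else " \n" ++ s) (i + 16)
  else out
termination_by (((full.length : Int)) - i).toNat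
decreasing_by omega

def raw_bytes_to_string_pretty_alt (raw_bytes : List String) : String :=
  pvLoopB raw_bytes "" 0

-- ===== PRECONDITION & SPEC =====
def Spec_raw_bytes_to_string_pretty (raw_bytes : List String) (out : String) : Prop := out = raw_bytes_to_string_pretty_alt raw_bytes
instance (raw_bytes : List String) (out : String) : Decidable (Spec_raw_bytes_to_string_pretty raw_bytes out) := by unfold Spec_raw_bytes_to_string_pretty; infer_instance

-- ===== CLAIM (what is proved, stated in full; the proofs are below) =====
def Claim_equal_raw_bytes_to_string_pretty : Prop := ∀ (raw_bytes : List String), Dom_raw_bytes_to_string_pretty raw_bytes → Spec_raw_bytes_to_string_pretty raw_bytes (raw_bytes_to_string_pretty raw_bytes)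

-- ===== LEMMAS AND PROOFS =====

-- what A appends for element x at index i
def pvPiece (i : Int) (x : String) : String :=
  (if 0 < i ∧ PySem.Int.mod i 8 = 0 then " " else "") ++
  (if 0 < i ∧ PySem.Int.mod i 16 = 0 then "\n" else "") ++ x ++ " "

-- A's loop from index i onward, as structural recursion
def pvAux (i : Int) : List String → String
  | [] => ""
  | x :: r => pvPiece i x ++ pvAux (i + 1) r

-- plain concatenation "x1 ␣ x2 ␣ …"
def pvCat : List String → String
  | [] => ""
  | x :: r => x ++ " " ++ pvCat r

lemma pvRowHalf_eq (l : List String) : ∀ s : String, pvRowHalf s l = s ++ pvCat l := by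
  induction l with
  | nil => intro s; simp [pvRowHalf, pvCat]
  | cons x r ih =>
      intro s
      simp only [pvRowHalf, List.foldl_cons, pvCat] at *
      rw [ih (s ++ x ++ " ")]
      simp [String.append_assoc]

lemma pvAux_append (as bs : List String) : ∀ i : Int,
    pvAux i (as ++ bs) = pvAux i as ++ pvAux (i + as.length) bs := by
  induction as with
  | nil => intro i; simp [pvAux]
  | cons x r ih =>
      intro i
      simp only [List.cons_append, pvAux, ih (i + 1), List.length_cons]
      rw [String.append_assoc]
      congr 2
      push_cast
      ring_nf

lemma pvPiece_plain (i : Int) (x : String) (h8 : PySem.Int.mod i 8 ≠ 0 ∨ ¬ 0 < i) :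
    pvPiece i x = x ++ " " := by
  unfold pvPiece
  rcases h8 with h | h
  · rw [if_neg (fun hc => h hc.2)]
    rw [if_neg]
    · simp
    · rintro ⟨hp, hm⟩
      have h16 := PySem.Int.mod_eq_emod_of_pos (a := i) (b := 16) (by norm_num)
      have h8' := PySem.Int.mod_eq_emod_of_pos (a := i) (b := 8) (by norm_num)
      rw [h16] at hm; rw [h8'] at h
      omega
  · rw [if_neg (fun hc => h hc.1), if_neg (fun hc => h hc.1)]; simp

lemma pvAux_mid (l : List String) : ∀ i : Int, 0 < i → i + l.length ≤ 8 → pvAux i l = pvCat l := by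
  induction l with
  | nil => intro i _ _; simp [pvAux, pvCat]
  | cons x r ih =>
      intro i hi hle
      simp only [List.length_cons] at hle
      have : pvPiece i x = x ++ " " := by
        apply pvPiece_plain
        left
        rw [PySem.Int.mod_eq_emod_of_pos (by norm_num : (0:Int) < 8)]
        omega
      simp only [pvAux, this, ih (i+1) (by omega) (by push_cast at hle ⊢; omega)]
      simp [pvCat, String.append_assoc]

lemma pvAux_high (l : List String) : ∀ i : Int, 8 < i → i + l.length ≤ 16 → pvAux i l = pvCat l := by
  induction l with
  | nil => intro i _ _; simp [pvAux, pvCat]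
  | cons x r ih =>
      intro i hi hle
      simp only [List.length_cons] at hle
      have : pvPiece i x = x ++ " " := by
        apply pvPiece_plain
        left
        rw [PySem.Int.mod_eq_emod_of_pos (by norm_num : (0:Int) < 8)]
        omega
      simp only [pvAux, this, ih (i+1) (by omega) (by push_cast at hle ⊢; omega)]
      simp [pvCat, String.append_assoc]

lemma pvAux_shift (l : List String) : ∀ i : Int, 17 ≤ i → pvAux i l = pvAux (i - 16) l := by
  induction l with
  | nil => intro i _; simp [pvAux]
  | cons x r ih =>
      intro i hi
      have hp : pvPiece i x = pvPiece (i - 16) x := by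
        unfold pvPiece
        rw [PySem.Int.mod_eq_emod_of_pos (by norm_num : (0:Int) < 8),
            PySem.Int.mod_eq_emod_of_pos (by norm_num : (0:Int) < 16),
            PySem.Int.mod_eq_emod_of_pos (a := i - 16) (by norm_num : (0:Int) < 8),
            PySem.Int.mod_eq_emod_of_pos (a := i - 16) (by norm_num : (0:Int) < 16)]
        have e8 : i % 8 = (i - 16) % 8 := by omega
        have e16 : i % 16 = (i - 16) % 16 := by omega
        have h0i : (0:Int) < i := by omega
        have h0i' : (0:Int) < i - 16 := by omega
        simp only [e8, e16, h0i, h0i', true_and]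
      simp only [pvAux, hp, ih (i+1) (by omega)]
      congr 2
      ring_nf

lemma pvAux_zero_cons (x : String) (r : List String) :
    pvAux 0 (x :: r) = x ++ " " ++ pvAux 1 r := by
  have : pvPiece 0 x = x ++ " " := by
    apply pvPiece_plain; right; omega
  simp [pvAux, this, String.append_assoc]

-- one row (≤ 16 elements) starting at index 0
lemma pvAux_row (xs : List String) (h : xs.length ≤ 16) :
    pvAux 0 xs = if 8 < xs.length then pvCat (xs.take 8) ++ " " ++ pvCat (xs.drop 8)
                 else pvCat xs := by
  cases xs with
  | nil => simp [pvAux, pvCat]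
  | cons x r =>
      rw [pvAux_zero_cons]
      by_cases h8 : (x :: r).length ≤ 8
      · rw [if_neg (by omega)]
        simp only [List.length_cons] at h8
        rw [pvAux_mid r 1 (by norm_num) (by push_cast; omega)]
        simp [pvCat, String.append_assoc]
      · rw [if_pos (by omega)]
        simp only [List.length_cons] at h h8
        have hr : r = r.take 7 ++ r.drop 7 := (List.take_append_drop 7 r).symm
        have hlen7 : (r.take 7).length = 7 := by
          rw [List.length_take]; omega
        conv_lhs => rw [hr]
        rw [pvAux_append (r.take 7) (r.drop 7) 1, hlen7]
        norm_num
        have hd : r.drop 7 ≠ [] := by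
          intro hnil
          have := congrArg List.length hnil
          simp [List.length_drop] at this
          omega
        obtain ⟨y, r2, hy⟩ := List.exists_cons_of_ne_nil hd
        rw [hy]
        have hp8 : pvPiece 8 y = " " ++ y ++ " " := by
          unfold pvPiece
          rw [if_pos ⟨by norm_num, by rw [PySem.Int.mod_eq_emod_of_pos (by norm_num : (0:Int) < 8)]; norm_num⟩,
              if_neg]
          · simp [String.append_assoc]
          · rintro ⟨_, hm⟩
            rw [PySem.Int.mod_eq_emod_of_pos (by norm_num : (0:Int) < 16)] at hm
            omega
        have hlen2 : r2.length = r.length - 8 := by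
          have := congrArg List.length hy
          simp [List.length_drop] at this
          omega
        simp only [pvAux, hp8]
        norm_num
        rw [pvAux_high r2 9 (by norm_num) (by push_cast; omega)]
        rw [pvAux_mid (r.take 7) 1 (by norm_num) (by push_cast; omega)]
        simp [pvCat, String.append_assoc]

-- pvAux 16 restarts as pvAux 0 with the row separator in front
lemma pvAux_sixteen (xs : List String) (h : xs ≠ []) :
    pvAux 16 xs = " \n" ++ pvAux 0 xs := by
  obtain ⟨y, r, rfl⟩ := List.exists_cons_of_ne_nil h
  have hp : pvPiece 16 y = " " ++ "\n" ++ y ++ " " := by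
    unfold pvPiece
    rw [if_pos, if_pos]
    · exact ⟨by norm_num, by rw [PySem.Int.mod_eq_emod_of_pos (by norm_num : (0:Int) < 16)]; norm_num⟩
    · exact ⟨by norm_num, by rw [PySem.Int.mod_eq_emod_of_pos (by norm_num : (0:Int) < 8)]; norm_num⟩
  have hsh : pvAux (16 + 1) r = pvAux 1 r := by
    have := pvAux_shift r 17 (by norm_num)
    norm_num at this ⊢
    exact this
  rw [pvAux_zero_cons]
  simp only [pvAux, hp, hsh]
  have hsp : (" " : String) ++ "\n" = " \n" := by decide
  rw [← hsp]
  simp [String.append_assoc]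

-- one chunk of A's output split off
lemma pvChunk (xs : List String) (hne : xs ≠ []) :
    pvAux 0 xs =
      (if 8 < (xs.take 16).length
        then pvRowHalf (pvRowHalf "" ((xs.take 16).take 8) ++ " ") ((xs.take 16).drop 8)
        else pvRowHalf "" ((xs.take 16).take 8)) ++
      (if xs.drop 16 = [] then "" else " \n" ++ pvAux 0 (xs.drop 16)) := by
  cases xs with
  | nil => exact absurd rfl hne
  | cons x r =>
  by_cases hrest : (x :: r).drop 16 = []
  · rw [if_pos hrest]
    conv_lhs => rw [← List.take_append_drop 16 (x :: r), hrest, List.append_nil]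
    rw [pvAux_row ((x :: r).take 16) (by simp)]
    by_cases h8 : 8 < ((x :: r).take 16).length
    · simp only [if_pos h8]
      simp [pvRowHalf_eq, String.append_assoc]
    · simp only [if_neg h8]
      push_neg at h8
      rw [List.take_of_length_le (l := (x :: r).take 16) (by omega)]
      simp [pvRowHalf_eq]
  · rw [if_neg hrest]
    have h16 : 16 < (x :: r).length := by
      by_contra hle
      exact hrest (List.drop_eq_nil_of_le (by omega))
    have hlen16 : ((x :: r).take 16).length = 16 := by
      rw [List.length_take]; omega
    conv_lhs => rw [← List.take_append_drop 16 (x :: r)]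
    rw [pvAux_append ((x :: r).take 16) ((x :: r).drop 16) 0, hlen16]
    rw [show ((0:Int) + ((16:ℕ):Int)) = 16 by norm_num]
    rw [pvAux_sixteen _ hrest]
    rw [pvAux_row ((x :: r).take 16) (by omega)]
    rw [if_pos (by omega)]
    simp [pvRowHalf_eq, String.append_assoc]

-- the while loop against pvAux
lemma pvLoopB_eq (full : List String) : ∀ (m j : ℕ), full.length ≤ j + m →
    ∀ (out : String),
      pvLoopB full out (j : Int) =
        out ++ (if full.drop j = [] then "" else (if j = 0 then "" else " \n") ++ pvAux 0 (full.drop j)) := by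
  intro m
  induction m with
  | zero =>
      intro j hj out
      rw [pvLoopB, dif_neg (by exact_mod_cast (by omega : ¬ j < full.length))]
      rw [if_pos (List.drop_eq_nil_of_le (by omega))]
      simp
  | succ m ih =>
      intro j hj out
      by_cases hlt : j < full.length
      · rw [pvLoopB, dif_pos (by exact_mod_cast hlt)]
        have hstep : ((j:Int) + 16) = ((j + 16 : ℕ) : Int) := by push_cast; ring
        have hrow : PySem.List.slice full (some (j:Int)) (some (((j + 16 : ℕ)) : Int)) = (full.drop j).take 16 := by
          rw [PySem.List.slice_toNat full (by positivity) (by positivity)]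
          simp only [Int.toNat_natCast]
          congr 1
          omega
        have sl8 : ∀ ys : List String, PySem.List.slice ys none (some (8:Int)) = ys.take 8 := by
          intro ys; rw [PySem.List.slice_to ys (by norm_num)]; rfl
        have sf8 : ∀ ys : List String, PySem.List.slice ys (some (8:Int)) none = ys.drop 8 := by
          intro ys; rw [PySem.List.slice_from ys (by norm_num)]; rfl
        simp only [hstep, hrow, sl8, sf8]
        rw [ih (j + 16) (by omega)]
        have hne : full.drop j ≠ [] := by
          intro hnil
          have := congrArg List.length hnil
          simp [List.length_drop] at this
          omega
        rw [if_neg hne, pvChunk (full.drop j) hne, List.drop_drop]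
        have hz : ((j:Int) = 0) ↔ (j = 0) := by exact_mod_cast Iff.rfl
        by_cases hj0 : j = 0
        · subst hj0
          by_cases hr : full.drop (0 + 16) = []
          · rw [if_pos hr]
            simp [hr, String.append_assoc]
          · rw [if_neg hr]
            simp [hr, String.append_assoc]
        · by_cases hr : full.drop (j + 16) = []
          · rw [if_pos hr]
            simp [hr, hj0, hz, String.append_assoc]
          · rw [if_neg hr]
            simp [hr, hj0, hz, String.append_assoc]
      · rw [pvLoopB, dif_neg (by exact_mod_cast hlt)]
        rw [if_pos (List.drop_eq_nil_of_le (by omega))]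
        simp

-- pvAux 0 equals B's port
lemma pvAux_eq_alt (xs : List String) : pvAux 0 xs = raw_bytes_to_string_pretty_alt xs := by
  unfold raw_bytes_to_string_pretty_alt
  have := pvLoopB_eq xs xs.length 0 (by omega) ""
  norm_num at this
  rw [this]
  by_cases h : xs = []
  · subst h; simp [pvAux]
  · simp [h]

-- A's loop over range(k, len) as pvAux over drop k
lemma pvFoldA (full : List String) : ∀ (m k : Nat) (acc : String), full.length ≤ k + m →
    (PySem.List.pyRange (k : Int) (full.length : Int) 1).foldl
      (fun hexstr i =>
        let h1 := if 0 < i ∧ PySem.Int.mod i 8 = 0 then hexstr ++ " " else hexstr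
        let h2 := if 0 < i ∧ PySem.Int.mod i 16 = 0 then h1 ++ "\n" else h1
        h2 ++ PySem.List.pyGetD full i "" ++ " ") acc
    = acc ++ pvAux (k : Int) (full.drop k) := by
  intro m
  induction m with
  | zero =>
      intro k acc hk
      rw [PySem.List.pyRange_one_eq_nil (by exact_mod_cast (by omega : full.length ≤ k))]
      rw [List.drop_eq_nil_of_le (by omega)]
      simp [pvAux]
  | succ m ih =>
      intro k acc hk
      by_cases hlt : k < full.length
      · rw [PySem.List.pyRange_one_cons (by exact_mod_cast hlt)]
        simp only [List.foldl_cons]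
        rw [show ((k:Int) + 1) = ((k + 1 : Nat) : Int) by push_cast; ring]
        rw [ih (k + 1) _ (by omega)]
        rw [List.drop_eq_getElem_cons hlt]
        simp only [pvAux, pvPiece]
        rw [PySem.List.pyGetD_natCast full k "", List.getD_eq_getElem full "" hlt]
        split_ifs <;> simp [String.append_assoc]
      · rw [PySem.List.pyRange_one_eq_nil (by exact_mod_cast (by omega : full.length ≤ k))]
        rw [List.drop_eq_nil_of_le (by omega)]
        simp [pvAux]

-- A's port equals pvAux 0
lemma portA_eq_pvAux (xs : List String) : raw_bytes_to_string_pretty xs = pvAux 0 xs := by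
  unfold raw_bytes_to_string_pretty
  simpa using pvFoldA xs xs.length 0 "" (by omega)

-- ===== VERDICT (by name: the statement is the Claim_ definition above) =====
theorem raw_bytes_to_string_pretty_spec : Claim_equal_raw_bytes_to_string_pretty := by
  intro xs _
  unfold Spec_raw_bytes_to_string_pretty
  rw [portA_eq_pvAux, pvAux_eq_alt]
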